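-- pv_equiv track=rewrite | github.com/samsquire/forum | identikit.py | remove_position
-- ===== SOURCE A (Python) =====
-- def remove_position(source, identikit):
--     raw_communities = []
--
--     for record in identikit.split(" "):
--         components = record.split(":")
--         raw_name = components[0]
--         if len(components) == 2:
--             position = components[1]
--         else:
--             position = ""
--         if raw_name in source:
--             if position == source[raw_name]:
--                 raw_communities.append(record)
--             else:
--                 return ()
--         else:
--             raw_communities.append(raw_name)
--     return (identikit, raw_communities)
-- ===== SOURCE B (Python) =====
-- def remove_position(source, identikit):
--     records = identikit.split(" ")
--
--     def parse(record):
--         components = record.split(":")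
--         return (components[0], components[1] if len(components) == 2 else "")
--
--     pairs = [parse(r) for r in records]
--     # valid iff every (name, position) pair whose name is a key of source is
--     # literally one of source's items (set inclusion, no per-record compare loop)
--     if {p for p in pairs if p[0] in source} <= set(source.items()):
--         return (identikit, [r if n in source else n
--                             for r, (n, _) in zip(records, pairs)])
--     return ()
-- ===== Notes on version B (the rewrite author's own statement) =====
-- stated objective: alternative
-- what changed: Removes A's single interleaved loop with early return: B parses all records into (name, position) pairs, validates them wholesale by one set-inclusion test against source.items(), and builds the result as a pure mapping over zip(records, pairs).
-- outside the precondition, e.g. on remove_position({'a': '1'}, 'a:2'): A returns (), B returns ()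
import Mathlib
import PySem

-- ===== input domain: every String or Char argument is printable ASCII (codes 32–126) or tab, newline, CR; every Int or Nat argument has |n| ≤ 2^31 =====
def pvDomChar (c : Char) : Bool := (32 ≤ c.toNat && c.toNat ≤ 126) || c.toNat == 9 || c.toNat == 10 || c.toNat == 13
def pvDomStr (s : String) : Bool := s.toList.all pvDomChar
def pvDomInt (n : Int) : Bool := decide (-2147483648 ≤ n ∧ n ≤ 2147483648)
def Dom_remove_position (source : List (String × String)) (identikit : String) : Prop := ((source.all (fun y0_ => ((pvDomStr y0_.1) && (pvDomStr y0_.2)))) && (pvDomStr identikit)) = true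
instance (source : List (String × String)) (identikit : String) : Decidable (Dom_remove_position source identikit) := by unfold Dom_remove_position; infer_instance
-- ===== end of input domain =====

-- B replaces A's single interleaved loop (with early return) by: parse all records, validate by one set-inclusion test against source.items(), then build the result as a pure mapping; same O(n) cost (objective: alternative).


-- shared parsing (this exact code appears in both Pythons):
-- record.split(":")[0] and components[1] iff exactly two components, else ""
def pvParse (r : String) : String × String :=
  let comps := (PySem.Str.split? r ":").getD []
  (comps.getD 0 "", if comps.length = 2 then comps.getD 1 "" else "")

-- ===== PORT A =====
-- A's loop: builds raw_communities left to right, aborting (Python's `return ()`) on a position mismatch.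
def pvGoA (d : PySem.Dict String String) : List String → List String → Option (List String)
  | [], acc => some acc
  | r :: rs, acc =>
    let raw_name := (pvParse r).1
    let position := (pvParse r).2
    match d.get? raw_name with
    | some v => if position = v then pvGoA d rs (acc ++ [r]) else none
    | none => pvGoA d rs (acc ++ [raw_name])

def remove_position (source : List (String × String)) (identikit : String) : String × List String :=
  match pvGoA (PySem.Dict.ofList source) ((PySem.Str.split? identikit " ").getD []) [] with
  | some acc => (identikit, acc)
  | none => ("", [])   -- Python A returns the empty tuple () here, not a (String × List String); outside Pre_

-- ===== PORT B =====
def remove_position_alt (source : List (String × String)) (identikit : String) : String × List String :=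
  let d := PySem.Dict.ofList source
  let records := (PySem.Str.split? identikit " ").getD []
  let pairs := records.map pvParse
  if PySem.Set.issubset (PySem.Set.ofList (pairs.filter (fun p => d.contains p.1)))
       (PySem.Set.ofList d.items)
  then (identikit, (records.zip pairs).map (fun rp => if d.contains rp.2.1 then rp.1 else rp.2.1))
  else ("", [])   -- Python B returns the empty tuple () here, not a (String × List String); outside Pre_

-- ===== PRECONDITION & SPEC =====
-- Pre_ excludes exactly the inputs containing a record whose name is a key of source with a
-- different position: there Python A (and B) return the empty tuple (), which is not a value
-- of the declared return type String × List String.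
def Pre_remove_position (source : List (String × String)) (identikit : String) : Prop :=
  (((PySem.Str.split? identikit " ").getD []).all
    (fun r => (PySem.Dict.ofList source).getD (pvParse r).1 (pvParse r).2 == (pvParse r).2)) = true
instance (source : List (String × String)) (identikit : String) : Decidable (Pre_remove_position source identikit) := by unfold Pre_remove_position; infer_instance

def pvWitness_remove_position : (List (String × String)) × String := ([("a", "1")], "a:1 b")

def Spec_remove_position (source : List (String × String)) (identikit : String) (out : String × List String) : Prop := out = remove_position_alt source identikit
instance (source : List (String × String)) (identikit : String) (out : String × List String) : Decidable (Spec_remove_position source identikit out) := by unfold Spec_remove_position; infer_instance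

-- ===== CLAIM (what is proved, stated in full; the proofs are below) =====
def Claim_equal_remove_position : Prop := ∀ (source : List (String × String)) (identikit : String), Dom_remove_position source identikit → Pre_remove_position source identikit → Spec_remove_position source identikit (remove_position source identikit)

-- ===== LEMMAS AND PROOFS =====

-- A's loop, run on records that all pass the position check, returns acc ++ the per-record mapping.
theorem pvGoA_of_all (d : PySem.Dict String String) (rs : List String) (acc : List String)
    (h : ∀ r ∈ rs, d.getD (pvParse r).1 (pvParse r).2 == (pvParse r).2) :
    pvGoA d rs acc =
      some (acc ++ rs.map (fun r => if (d.get? (pvParse r).1).isSome then r else (pvParse r).1)) := by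
  induction rs generalizing acc with
  | nil => simp [pvGoA]
  | cons r rs ih =>
    have hr := h r (by simp)
    have hrest : ∀ r' ∈ rs, d.getD (pvParse r').1 (pvParse r').2 == (pvParse r').2 :=
      fun r' hr' => h r' (by simp [hr'])
    cases hget : d.get? (pvParse r).1 with
    | none =>
      simp [pvGoA, hget, ih _ hrest]
    | some v =>
      have hv : (pvParse r).2 = v := by
        have h1 := hr
        rw [PySem.Dict.getD_eq_get?_getD, hget] at h1
        simp only [Option.getD_some, beq_iff_eq] at h1
        exact h1.symm
      simp [pvGoA, hget, hv, ih _ hrest]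

-- mapping over zip(records, records.map pvParse) is mapping over records
theorem pvZipMap {β : Type} (rs : List String) (f : String × (String × String) → β) :
    (rs.zip (rs.map pvParse)).map f = rs.map (fun r => f (r, pvParse r)) := by
  induction rs with
  | nil => rfl
  | cons r rs ih => simp [ih]

theorem remove_position_spec : Claim_equal_remove_position := by
  intro source identikit _ hpre
  unfold Spec_remove_position remove_position remove_position_alt
  set d := PySem.Dict.ofList source with hd
  set records := (PySem.Str.split? identikit " ").getD [] with hrec
  have hall : ∀ r ∈ records, d.getD (pvParse r).1 (pvParse r).2 == (pvParse r).2 := by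
    intro r hr
    unfold Pre_remove_position at hpre
    rw [List.all_eq_true] at hpre
    exact hpre r (by rw [hrec] at hr; exact hr)
  have hget_of_mem : ∀ r ∈ records, ∀ v, d.get? (pvParse r).1 = some v → v = (pvParse r).2 := by
    intro r hr v hv
    have := hall r hr
    rw [PySem.Dict.getD_eq_get?_getD, hv] at this
    simpa using this.symm
  -- the subset test passes
  have hsub : PySem.Set.issubset
      (PySem.Set.ofList ((records.map pvParse).filter (fun p => d.contains p.1)))
      (PySem.Set.ofList d.items) = true := by
    rw [PySem.Set.issubset_iff]
    intro p hp
    rw [PySem.Set.mem_ofList] at hp ⊢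
    obtain ⟨hpmem, hpcont⟩ := List.mem_filter.mp hp
    obtain ⟨r, hr, hpr⟩ := List.mem_map.mp hpmem
    rw [PySem.Dict.contains_eq_isSome_get?] at hpcont
    cases hget : d.get? p.1 with
    | none => rw [hget] at hpcont; simp at hpcont
    | some v =>
      subst hpr
      have hv : v = (pvParse r).2 := hget_of_mem r hr v hget
      have h2 : d.get? (pvParse r).1 = some (pvParse r).2 := by rw [hget, hv]
      simpa using PySem.Dict.mem_items_of_get?_eq_some d h2
  rw [pvGoA_of_all d records [] hall]
  simp only [hsub, if_true, List.nil_append]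
  rw [pvZipMap]
  refine Prod.ext rfl ?_
  apply List.map_congr_left
  intro r _
  rw [PySem.Dict.contains_eq_isSome_get?]
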